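-- pv_equiv track=rewrite | github.com/IvanPleshakov/Comparison-of-python-codes | compare.py | structure_syntax
-- ===== SOURCE A (Python) =====
-- def structure_syntax(string):
--     # Удаляет и преобразует символы строки
--     syntax = ":=.,+*&|\[]"
--     for i in syntax:
--         string = string.replace(i, ' ', -1)
--
--     string = string.replace(')', ' ) ', -1)
--     string = string.replace('(', ' ( ', -1)
--     string = string.split(' ')
--     string = [s.strip() for s in string if s.strip()]
--
--     return ' '.join(string)
-- ===== SOURCE B (Python) =====
-- def structure_syntax(string):
--     seps = set(':=.,+*&|\\[] ')
--     out = []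
--     buf = []
--     for ch in string:
--         if ch in seps:
--             tok = ''.join(buf).strip()
--             if tok:
--                 out.append(tok)
--             buf = []
--         elif ch in '()':
--             tok = ''.join(buf).strip()
--             if tok:
--                 out.append(tok)
--             out.append(ch)
--             buf = []
--         else:
--             buf.append(ch)
--     tok = ''.join(buf).strip()
--     if tok:
--         out.append(tok)
--     return ' '.join(out)
-- ===== Notes on version B (the rewrite author's own statement) =====
-- stated objective: alternative
-- what changed: Replaced A's fourteen whole-string passes (eleven single-char replaces, two paren replaces, then split/strip/filter/join) by a single-pass character scanner that flushes a stripped token buffer at each separator and emits parens as their own tokens.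
import Mathlib
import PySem

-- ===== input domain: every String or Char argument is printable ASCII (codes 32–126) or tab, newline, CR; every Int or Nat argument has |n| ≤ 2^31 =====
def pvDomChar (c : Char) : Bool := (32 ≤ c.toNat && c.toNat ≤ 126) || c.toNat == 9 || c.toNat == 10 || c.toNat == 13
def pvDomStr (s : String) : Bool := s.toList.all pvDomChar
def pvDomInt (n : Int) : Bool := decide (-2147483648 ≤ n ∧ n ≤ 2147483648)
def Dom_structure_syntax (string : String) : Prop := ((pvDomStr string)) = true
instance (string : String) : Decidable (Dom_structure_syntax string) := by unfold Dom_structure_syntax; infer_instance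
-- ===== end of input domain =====

-- B is a single-pass character scanner (one traversal, no repeated whole-string replace passes);
-- objective: alternative decomposition of the same tokenisation.

-- ===== PORT A =====
-- the characters of A's `syntax = ":=.,+*&|\[]"` (the backslash is literal in Python)
def pvSyntaxA : List Char := [':', '=', '.', ',', '+', '*', '&', '|', '\\', '[', ']']

def structure_syntax (string : String) : String :=
  let s1 := pvSyntaxA.foldl (fun s c => PySem.Str.replace s (String.ofList [c]) " ") string
  let s2 := PySem.Str.replace s1 ")" " ) "
  let s3 := PySem.Str.replace s2 "(" " ( "
  let parts := (PySem.Str.split? s3 " ").getD []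
  let toks := (parts.filter (fun s => PySem.Str.strip s ≠ "")).map PySem.Str.strip
  PySem.Str.join " " toks

-- ===== PORT B =====
-- separator set of Source B: the 11 syntax chars plus the space
def pvSepsB : List Char := [':', '=', '.', ',', '+', '*', '&', '|', '\\', '[', ']', ' ']

-- `tok = ''.join(buf).strip(); if tok: out.append(tok)`
def pvFlushB (out : List String) (buf : List Char) : List String :=
  let tok := PySem.Chars.strip buf
  if tok = [] then out else out ++ [String.ofList tok]

-- the `for ch in string` loop of Source B
def pvScanB : List Char → List String → List Char → List String
  | [], out, buf => pvFlushB out buf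
  | c :: rest, out, buf =>
      if c ∈ pvSepsB then pvScanB rest (pvFlushB out buf) []
      else if c = '(' ∨ c = ')' then pvScanB rest (pvFlushB out buf ++ [String.ofList [c]]) []
      else pvScanB rest out (buf ++ [c])

def structure_syntax_alt (string : String) : String :=
  PySem.Str.join " " (pvScanB string.toList [] [])

-- ===== PRECONDITION & SPEC =====
def Spec_structure_syntax (string : String) (out : String) : Prop := out = structure_syntax_alt string
instance (string : String) (out : String) : Decidable (Spec_structure_syntax string out) := by unfold Spec_structure_syntax; infer_instance

-- ===== CLAIM (what is proved, stated in full; the proofs are below) =====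
def Claim_equal_structure_syntax : Prop := ∀ (string : String), Dom_structure_syntax string → Spec_structure_syntax string (structure_syntax string)

-- ===== LEMMAS AND PROOFS =====

-- what the whole replace chain of A does to one character
def pvFmap (x : Char) : List Char :=
  if x ∈ pvSepsB then [' ']
  else if x = ')' then [' ', ')', ' ']
  else if x = '(' then [' ', '(', ' ']
  else [x]

-- split at a single character c: (first piece, remaining pieces)
def pvSplit (c : Char) : List Char → List Char × List (List Char)
  | [] => ([], [])
  | x :: t =>
      let p := pvSplit c t
      if x = c then ([], p.1 :: p.2) else (x :: p.1, p.2)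

-- A's strip-filter comprehension, at the char-list level
def pvSpecTokens (ps : List (List Char)) : List String :=
  (ps.filter (fun p => PySem.Chars.strip p ≠ [])).map (fun p => String.ofList (PySem.Chars.strip p))

theorem pvReplaceGo_single (c : Char) (new : List Char) :
    ∀ (fuel : Nat) (l acc : List Char), l.length ≤ fuel →
      PySem.Chars.replace.go [c] new fuel l acc =
        acc.reverse ++ l.flatMap (fun x => if x = c then new else [x]) := by
  intro fuel
  induction fuel with
  | zero =>
    intro l acc h
    have : l = [] := List.length_eq_zero_iff.mp (Nat.le_zero.mp h)
    subst this; simp [PySem.Chars.replace.go]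
  | succ n ih =>
    intro l acc h
    cases l with
    | nil => simp [PySem.Chars.replace.go]
    | cons x t =>
      simp only [List.length_cons, Nat.add_le_add_iff_right] at h
      simp only [PySem.Chars.replace.go, List.isPrefixOf]
      by_cases hx : x = c
      · subst hx
        simp only [BEq.rfl, Bool.true_and, ite_true, List.length_cons, List.length_nil,
          List.drop_succ_cons, List.drop_zero]
        rw [ih t _ h]
        simp
      · have : (c == x) = false := by simp [BEq.comm]; exact fun h' => hx h'.symm
        simp only [this, Bool.false_and, if_neg, Bool.false_eq_true, not_false_iff, ite_false]
        rw [ih t _ h]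
        simp [hx]

theorem pvReplace_single (c : Char) (new cs : List Char) :
    PySem.Chars.replace cs [c] new = cs.flatMap (fun x => if x = c then new else [x]) := by
  simp [PySem.Chars.replace]
  exact pvReplaceGo_single c new cs.length cs [] (le_refl _)

theorem pvSplitOnGo_single (c : Char) :
    ∀ (fuel : Nat) (l cur : List Char) (acc : List (List Char)), l.length < fuel →
      PySem.Chars.splitOn.go [c] fuel l cur acc =
        acc.reverse ++ (cur.reverse ++ (pvSplit c l).1) :: (pvSplit c l).2 := by
  intro fuel
  induction fuel with
  | zero => intro l cur acc h; omega
  | succ n ih =>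
    intro l cur acc h
    cases l with
    | nil => simp [PySem.Chars.splitOn.go, pvSplit]
    | cons x t =>
      simp only [List.length_cons, Nat.add_lt_add_iff_right] at h
      simp only [PySem.Chars.splitOn.go, List.isPrefixOf]
      by_cases hx : x = c
      · subst hx
        simp only [BEq.rfl, Bool.true_and, ite_true, List.length_cons, List.length_nil,
          List.drop_succ_cons, List.drop_zero]
        rw [ih t [] _ h]
        simp [pvSplit]
      · have : (c == x) = false := by simp [BEq.comm]; exact fun h' => hx h'.symm
        simp only [this, Bool.false_and, Bool.false_eq_true, if_neg, not_false_iff, ite_false]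
        rw [ih t (x :: cur) _ h]
        simp [pvSplit, hx]

theorem pvSplitOn_single (c : Char) (cs : List Char) :
    PySem.Chars.splitOn cs [c] = (pvSplit c cs).1 :: (pvSplit c cs).2 := by
  simp [PySem.Chars.splitOn]
  rw [pvSplitOnGo_single c (cs.length + 1) cs [] [] (by omega)]
  simp

theorem pvSpecTokens_cons (p : List Char) (ps : List (List Char)) :
    pvSpecTokens (p :: ps) =
      (if PySem.Chars.strip p = [] then [] else [String.ofList (PySem.Chars.strip p)]) ++ pvSpecTokens ps := by
  by_cases h : PySem.Chars.strip p = [] <;> simp [pvSpecTokens, h]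

theorem pvFlushB_eq (out : List String) (buf : List Char) :
    pvFlushB out buf =
      out ++ (if PySem.Chars.strip buf = [] then [] else [String.ofList (PySem.Chars.strip buf)]) := by
  by_cases h : PySem.Chars.strip buf = [] <;> simp [pvFlushB, h]

-- the chain of A's replaces acts characterwise as pvFmap
theorem pvChain_single (x : Char) :
    ((if x = ':' then [' '] else [x]).flatMap fun y1 =>
      (if y1 = '=' then [' '] else [y1]).flatMap fun y2 =>
      (if y2 = '.' then [' '] else [y2]).flatMap fun y3 =>
      (if y3 = ',' then [' '] else [y3]).flatMap fun y4 =>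
      (if y4 = '+' then [' '] else [y4]).flatMap fun y5 =>
      (if y5 = '*' then [' '] else [y5]).flatMap fun y6 =>
      (if y6 = '&' then [' '] else [y6]).flatMap fun y7 =>
      (if y7 = '|' then [' '] else [y7]).flatMap fun y8 =>
      (if y8 = '\\' then [' '] else [y8]).flatMap fun y9 =>
      (if y9 = '[' then [' '] else [y9]).flatMap fun y10 =>
      (if y10 = ']' then [' '] else [y10]).flatMap fun y11 =>
      (if y11 = ')' then [' ', ')', ' '] else [y11]).flatMap fun y12 =>
      (if y12 = '(' then [' ', '(', ' '] else [y12]))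
    = pvFmap x := by
  by_cases h : x ∈ pvSepsB
  · rw [pvFmap, if_pos h]
    simp only [pvSepsB, List.mem_cons, List.not_mem_nil, or_false] at h
    rcases h with h | h | h | h | h | h | h | h | h | h | h | h <;> subst h <;> decide
  · by_cases h1 : x = ')'
    · subst h1; decide
    · by_cases h2 : x = '('
      · subst h2; decide
      · simp only [pvSepsB, List.mem_cons, List.not_mem_nil, or_false] at h
        push_neg at h
        obtain ⟨n1, n2, n3, n4, n5, n6, n7, n8, n9, n10, n11, n12⟩ := h
        simp [pvFmap, pvSepsB, n1, n2, n3, n4, n5, n6, n7, n8, n9, n10, n11, n12, h1, h2]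

-- MAIN: the scanner equals strip-filter over the split of the flatMap image
theorem pvScan_eq (l : List Char) :
    ∀ (buf : List Char) (out : List String),
      pvScanB l out buf =
        out ++ pvSpecTokens
          ((buf ++ (pvSplit ' ' (l.flatMap pvFmap)).1) :: (pvSplit ' ' (l.flatMap pvFmap)).2) := by
  induction l with
  | nil =>
    intro buf out
    simp only [pvScanB, List.flatMap_nil, pvSplit, List.append_nil, pvFlushB_eq]
    by_cases h : PySem.Chars.strip buf = [] <;> simp [pvSpecTokens, h]
  | cons x t ih =>
    intro buf out
    by_cases hs : x ∈ pvSepsB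
    · have hf : pvFmap x = [' '] := by simp [pvFmap, hs]
      simp only [pvScanB, if_pos hs, List.flatMap_cons, hf, List.cons_append, List.nil_append,
        pvSplit, ite_true]
      rw [ih [] (pvFlushB out buf)]
      simp [pvSpecTokens_cons, pvFlushB_eq]
    · by_cases hp : x = '(' ∨ x = ')'
      · have hxs : x ≠ ' ' := by rcases hp with h | h <;> subst h <;> decide
        have hf : pvFmap x = [' ', x, ' '] := by
          rcases hp with h | h <;> subst h <;> rfl
        have hstrip : PySem.Chars.strip [x] = [x] := by
          rcases hp with h | h <;> subst h <;> decide
        simp only [pvScanB, if_neg hs, if_pos hp, List.flatMap_cons, hf, List.cons_append,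
          List.nil_append, pvSplit, ite_true, if_neg hxs]
        rw [ih [] (pvFlushB out buf ++ [String.ofList [x]])]
        simp [pvSpecTokens_cons, pvFlushB_eq, hstrip]
      · have hxs : x ≠ ' ' := fun h => hs (by subst h; decide)
        have hf : pvFmap x = [x] := by
          push_neg at hp
          simp [pvFmap, hs, hp.1, hp.2]
        simp only [pvScanB, if_neg hs, if_neg hp, List.flatMap_cons, hf, List.cons_append,
          List.nil_append, pvSplit, if_neg hxs]
        rw [ih (buf ++ [x]) out]
        simp

-- A's replace chain at the char level
set_option maxHeartbeats 1000000 in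
theorem pvChain_eq (cs : List Char) :
    PySem.Chars.replace
      (PySem.Chars.replace
        (pvSyntaxA.foldl (fun s c => PySem.Chars.replace s [c] [' ']) cs)
        [')'] [' ', ')', ' '])
      ['('] [' ', '(', ' '] = cs.flatMap pvFmap := by
  simp only [pvSyntaxA, List.foldl_cons, List.foldl_nil]
  simp only [pvReplace_single]
  simp only [List.flatMap_assoc]
  exact List.flatMap_congr (fun x _ => pvChain_single x)

theorem pvTokens_eq (ps : List (List Char)) :
    ((ps.map String.ofList).filter (fun t => PySem.Str.strip t ≠ "")).map PySem.Str.strip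
      = pvSpecTokens ps := by
  induction ps with
  | nil => rfl
  | cons p t ih =>
    by_cases h : PySem.Chars.strip p = [] <;>
      simp [pvSpecTokens_cons, PySem.Str.strip, String.toList_ofList, h,
        ← ih]

-- ===== VERDICT (by name: the statement is the Claim_ definition above) =====
theorem structure_syntax_spec : Claim_equal_structure_syntax := by
  intro s _
  unfold Spec_structure_syntax structure_syntax structure_syntax_alt
  have hsp : (" " : String).toList = [' '] := by decide
  have hrp : (")" : String).toList = [')'] := by decide
  have hlp : ("(" : String).toList = ['('] := by decide
  have hrp3 : (" ) " : String).toList = [' ', ')', ' '] := by decide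
  have hlp3 : (" ( " : String).toList = [' ', '(', ' '] := by decide
  have hfold : (pvSyntaxA.foldl (fun t c => PySem.Str.replace t (String.ofList [c]) " ") s).toList
      = pvSyntaxA.foldl (fun cs c => PySem.Chars.replace cs [c] [' ']) s.toList := by
    simp only [pvSyntaxA, List.foldl_cons, List.foldl_nil, PySem.Str.toList_replace,
      String.toList_ofList, hsp]
  have h3 : (PySem.Str.replace
        (PySem.Str.replace
          (pvSyntaxA.foldl (fun t c => PySem.Str.replace t (String.ofList [c]) " ") s) ")" " ) ")
        "(" " ( ").toList = s.toList.flatMap pvFmap := by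
    simp only [PySem.Str.toList_replace, hfold, hrp, hlp, hrp3, hlp3]
    exact pvChain_eq s.toList
  have hsplit : PySem.Str.split?
      (PySem.Str.replace
        (PySem.Str.replace
          (pvSyntaxA.foldl (fun t c => PySem.Str.replace t (String.ofList [c]) " ") s) ")" " ) ")
        "(" " ( ") " "
      = some (List.map String.ofList
          ((pvSplit ' ' (s.toList.flatMap pvFmap)).1 :: (pvSplit ' ' (s.toList.flatMap pvFmap)).2)) := by
    simp [PySem.Str.split?, PySem.Chars.split?, h3, hsp, pvSplitOn_single]
  simp only [hsplit, Option.getD_some]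
  rw [pvScan_eq s.toList [] []]
  rw [pvTokens_eq]
  simp
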